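-- pv_equiv track=rewrite | github.com/AlvinOgren/letter-boxed-solver | main.py | backtrackFunction
-- ===== SOURCE A (Python) =====
-- def isValidWord(word, boardSides):
--     """
--     Checks if a word is valid:
--     No consecutive letters from same side.
--     Uses letters only presented by the board.
--     """
--
--     for letterIndex in range(len(word) - 1):
--         for side in boardSides:
--             if word[letterIndex] in side and word[letterIndex + 1] in side:
--                 return False
--     return True
--
-- def backtrackFunction(boardSides, dictionary, usedWords, currentWord, usedLetters, allLetters, maxWords = 5):
--     """
--     Function that implements backtracking to find a solution.
--     """
--
--     # All letters have been used
--     if set(usedLetters) == set(allLetters):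
--         return usedWords
--
--     if len(usedWords) >= maxWords:
--         return None
--
--     for word in dictionary:
--         if word[0] == usedWords[-1][-1]: # Next word must start with last word's last letter
--             # Ensure that the word is valid and hasn't been used already
--             if isValidWord(word, boardSides) and word[0] and word not in usedWords:
--                 newUsedLetters = usedLetters | set(word)
--                 newUsedWords = usedWords + [word]
--                 result = backtrackFunction(boardSides, dictionary, newUsedWords, word, newUsedLetters, allLetters)
--
--                 if result:
--                     return result
--     return None
-- ===== SOURCE B (Python) =====
-- def isValidWord(word, boardSides):
--     for letterIndex in range(len(word) - 1):
--         for side in boardSides: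
--             if word[letterIndex] in side and word[letterIndex + 1] in side:
--                 return False
--     return True
--
-- def backtrackFunction(boardSides, dictionary, usedWords, currentWord, usedLetters, allLetters, maxWords = 5):
--     """Iterative DFS with an explicit stack of (usedWords, usedLetters, cap) frames."""
--     stack = [(usedWords, usedLetters, maxWords)]
--     while stack:
--         words, letters, cap = stack.pop()
--         if set(letters) == set(allLetters):
--             return words
--         if len(words) >= cap:
--             continue
--         last = words[-1][-1]
--         children = [(words + [w], letters | set(w), 5)
--                     for w in dictionary
--                     if w[0] == last and isValidWord(w, boardSides) and w not in words]
--         stack.extend(reversed(children))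
--     return None
-- ===== Notes on version B (the rewrite author's own statement) =====
-- stated objective: alternative
-- what changed: Replaced the recursive backtracking with an iterative depth-first search over an explicit stack of (usedWords, usedLetters, cap) frames, pushing each frame's valid continuations in reverse dictionary order so they pop in dictionary order; the seed frame carries the caller's maxWords and every pushed child carries 5, mirroring the recursive call that drops the argument.
-- outside the precondition, e.g. on backtrackFunction(['ab'], [], [], '', set(), 'ab', 5): A returns None, B raises IndexError; on backtrackFunction(['a'], ['ab', ''], ['a'], 'a', {'a'}, 'ab', 5): A returns ['a', 'ab'], B raises IndexError
import Mathlib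
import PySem

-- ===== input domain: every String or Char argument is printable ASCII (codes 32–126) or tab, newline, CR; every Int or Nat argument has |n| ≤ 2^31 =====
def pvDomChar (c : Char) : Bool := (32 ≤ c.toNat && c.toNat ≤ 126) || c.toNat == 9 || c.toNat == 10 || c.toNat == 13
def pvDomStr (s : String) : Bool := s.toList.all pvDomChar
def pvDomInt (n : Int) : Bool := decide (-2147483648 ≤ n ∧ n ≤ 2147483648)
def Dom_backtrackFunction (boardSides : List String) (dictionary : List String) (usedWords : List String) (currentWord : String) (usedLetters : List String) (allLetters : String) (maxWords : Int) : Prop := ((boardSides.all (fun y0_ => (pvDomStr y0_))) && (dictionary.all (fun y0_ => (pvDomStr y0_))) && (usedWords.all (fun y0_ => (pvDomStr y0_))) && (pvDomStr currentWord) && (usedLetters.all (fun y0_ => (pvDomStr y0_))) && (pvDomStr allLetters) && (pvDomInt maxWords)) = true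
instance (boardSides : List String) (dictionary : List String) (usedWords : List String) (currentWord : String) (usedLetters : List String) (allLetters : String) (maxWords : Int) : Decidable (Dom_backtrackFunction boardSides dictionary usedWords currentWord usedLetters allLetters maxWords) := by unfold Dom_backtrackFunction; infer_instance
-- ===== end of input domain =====

-- B replaces A's recursion by an iterative DFS over an explicit stack of frames, same search order and results (objective: alternative).

-- shared helpers (both Pythons use the same isValidWord helper and the same set operations)

-- set(s) for a string s: the set of its one-character strings
def pvStrSet (s : String) : PySem.Set String :=
  PySem.Set.ofList (s.toList.map (fun c => String.mk [c]))

-- set(usedLetters) == set(allLetters)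
def pvSetEq (usedLetters : List String) (allLetters : String) : Bool :=
  PySem.Set.equal (PySem.Set.ofList usedLetters) (pvStrSet allLetters)

-- usedLetters | set(word)
def pvAddLetters (usedLetters : List String) (word : String) : List String :=
  PySem.Set.union (PySem.Set.ofList usedLetters) (word.toList.map (fun c => String.mk [c]))

-- port of isValidWord: no two consecutive letters of word on the same side
def isValidWordL (word : String) (boardSides : List String) : Bool :=
  (word.toList.zip word.toList.tail).all (fun p =>
    boardSides.all (fun side => !(side.toList.contains p.1 && side.toList.contains p.2)))

-- usedWords[-1][-1] (defaults are only reached outside Pre_, where Python raises)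
def pvLastChar (usedWords : List String) : Char :=
  ((usedWords.getLastD "").toList).getLastD ' '

-- word[0] == usedWords[-1][-1] and isValidWord(word) and word[0] and word not in usedWords
-- (the empty word is rejected here; in Python word[0] raises on it, outside Pre_)
def pvCand (boardSides usedWords : List String) (lastc : Char) (w : String) : Bool :=
  match w.toList with
  | [] => false
  | c :: _ => c == lastc && isValidWordL w boardSides && !(usedWords.contains w)

-- ===== PORT A =====
mutual
def backtrackFunction (boardSides : List String) (dictionary : List String) (usedWords : List String) (currentWord : String) (usedLetters : List String) (allLetters : String) (maxWords : Int) : Option (List String) :=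
  if pvSetEq usedLetters allLetters then some usedWords
  else if maxWords ≤ (usedWords.length : Int) then none
  else pvLoopA boardSides dictionary usedWords usedLetters allLetters dictionary
termination_by (if maxWords = 5 then ((5:Int) - usedWords.length).toNat else 6) * (dictionary.length + 2)
decreasing_by
  have h4 : ((4:Int) - usedWords.length).toNat + 1 ≤ (if maxWords = 5 then ((5:Int) - usedWords.length).toNat else 6) := by
    split <;> omega
  calc ((4:Int) - usedWords.length).toNat * (dictionary.length + 2) + 1 + dictionary.length
      < (((4:Int) - usedWords.length).toNat + 1) * (dictionary.length + 2) := by ring_nf; omega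
    _ ≤ (if maxWords = 5 then ((5:Int) - usedWords.length).toNat else 6) * (dictionary.length + 2) := by
        ring_nf; ring_nf at h4; nlinarith [h4]

-- the for-loop over the dictionary; the recursive call drops maxWords, so it uses the default 5
def pvLoopA (boardSides : List String) (dictionary : List String) (usedWords : List String) (usedLetters : List String) (allLetters : String) (rem : List String) : Option (List String) :=
  match rem with
  | [] => none
  | w :: ws =>
    if pvCand boardSides usedWords (pvLastChar usedWords) w then
      match backtrackFunction boardSides dictionary (usedWords ++ [w]) w (pvAddLetters usedLetters w) allLetters 5 with
      | some r => if r.isEmpty then pvLoopA boardSides dictionary usedWords usedLetters allLetters ws else some r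
      | none => pvLoopA boardSides dictionary usedWords usedLetters allLetters ws
    else pvLoopA boardSides dictionary usedWords usedLetters allLetters ws
termination_by (((4:Int) - usedWords.length).toNat) * (dictionary.length + 2) + 1 + rem.length
decreasing_by
  · have h5 : ((5:Int) - ((usedWords ++ [w]).length : Int)).toNat = ((4:Int) - usedWords.length).toNat := by
      simp; omega
    simp only [if_true, h5]
    omega
  · simp only [List.length_cons]; omega
  · simp only [List.length_cons]; omega
end

-- ===== PORT B =====
-- remaining search depth of a frame (termination measure only)
def pvDr (words : List String) (cap : Int) : Nat :=
  if cap ≤ (words.length : Int) then 0 else ((5:Int) - words.length).toNat + 1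

-- termination helper for pvStackB: a frame's subtree-size bound strictly shrinks on expansion
theorem pvSumBound (dict : List String) (l : List (List String × List String × Int)) (k : Nat)
    (hl : l.length ≤ dict.length)
    (hfr : ∀ fr ∈ l, pvDr fr.1 fr.2.2 ≤ k) :
    (l.map (fun fr => (dict.length + 1) ^ pvDr fr.1 fr.2.2)).sum < (dict.length + 1) ^ (k + 1) := by
  have hb : ∀ x ∈ l.map (fun fr => (dict.length + 1) ^ pvDr fr.1 fr.2.2),
      x ≤ (dict.length + 1) ^ k := by
    intro x hx
    rcases List.mem_map.mp hx with ⟨fr, hfr', rfl⟩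
    exact Nat.pow_le_pow_right (by omega) (hfr fr hfr')
  have hsum := List.sum_le_card_nsmul _ _ hb
  simp only [List.length_map, smul_eq_mul] at hsum
  have hpow : 0 < (dict.length + 1) ^ k := Nat.pow_pos (by omega)
  have hmul : l.length * (dict.length + 1) ^ k ≤ dict.length * (dict.length + 1) ^ k :=
    Nat.mul_le_mul_right _ hl
  have hfin : dict.length * (dict.length + 1) ^ k < (dict.length + 1) ^ (k + 1) := by
    rw [pow_succ]; nlinarith [hpow]
  omega

-- the while-loop of B: pop a frame, test it, push its valid continuations
def pvStackB (boardSides : List String) (dictionary : List String) (allLetters : String) (stack : List (List String × List String × Int)) : Option (List String) :=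
  match stack with
  | [] => none
  | (words, letters, cap) :: rest =>
    if pvSetEq letters allLetters then some words
    else if cap ≤ (words.length : Int) then pvStackB boardSides dictionary allLetters rest
    else
      pvStackB boardSides dictionary allLetters
        ((dictionary.filterMap (fun w =>
          if pvCand boardSides words (pvLastChar words) w then
            some (words ++ [w], pvAddLetters letters w, (5:Int))
          else none)) ++ rest)
termination_by (stack.map (fun fr => (dictionary.length + 1) ^ pvDr fr.1 fr.2.2)).sum
decreasing_by
  · have : 0 < (dictionary.length + 1) ^ pvDr words cap := Nat.pow_pos (by omega)
    simp only [List.map_cons, List.sum_cons]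
    omega
  · rename_i hset hcap
    have hk : pvDr words cap = ((5:Int) - words.length).toNat + 1 := by
      simp [pvDr, hcap]
    simp only [List.map_append, List.sum_append, List.map_cons, List.sum_cons]
    have hmain : (List.map (fun fr => (dictionary.length + 1) ^ pvDr fr.1 fr.2.2)
        (List.filterMap
          (fun x : {x // x ∈ dictionary} =>
            if h : pvCand boardSides words (pvLastChar words) (↑x : String) = true then
              some (words ++ [(↑x : String)], pvAddLetters letters (↑x : String), (5 : Int))
            else none)
          dictionary.attach)).sum < (dictionary.length + 1) ^ (((5:Int) - words.length).toNat + 1) := by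
      refine pvSumBound dictionary _ _ (le_trans (List.length_filterMap_le _ _) (by simp)) ?_
      intro fr hfr
      rcases List.mem_filterMap.mp hfr with ⟨x, hx, hif⟩
      split at hif
      · cases hif
        have hlen1 : (words ++ [(↑x : String)]).length = words.length + 1 := by simp
        simp only [pvDr, hlen1]
        split <;> omega
      · cases hif
    rw [hk]
    exact Nat.add_lt_add_right hmain _

def backtrackFunction_alt (boardSides : List String) (dictionary : List String) (usedWords : List String) (currentWord : String) (usedLetters : List String) (allLetters : String) (maxWords : Int) : Option (List String) :=
  pvStackB boardSides dictionary allLetters [(usedWords, usedLetters, maxWords)]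

-- ===== PRECONDITION & SPEC =====
-- Pre_ excludes exactly the inputs where the Python raises IndexError: those that reach the word loop
-- with usedWords empty, with an empty last used word, or with "" in the dictionary (word[0]/usedWords[-1][-1]).
def Pre_backtrackFunction (boardSides : List String) (dictionary : List String) (usedWords : List String) (currentWord : String) (usedLetters : List String) (allLetters : String) (maxWords : Int) : Prop :=
  (usedWords ≠ [] ∧ usedWords.getLastD "" ≠ "" ∧ "" ∉ dictionary)
  ∨ pvSetEq usedLetters allLetters = true
  ∨ maxWords ≤ (usedWords.length : Int)
instance (boardSides : List String) (dictionary : List String) (usedWords : List String) (currentWord : String) (usedLetters : List String) (allLetters : String) (maxWords : Int) : Decidable (Pre_backtrackFunction boardSides dictionary usedWords currentWord usedLetters allLetters maxWords) := by unfold Pre_backtrackFunction; infer_instance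

def pvWitness_backtrackFunction : List String × List String × List String × String × List String × String × Int :=
  (["ab"], ["ba"], ["ab"], "ab", ["a", "b"], "ab", 3)

def Spec_backtrackFunction (boardSides : List String) (dictionary : List String) (usedWords : List String) (currentWord : String) (usedLetters : List String) (allLetters : String) (maxWords : Int) (out : Option (List String)) : Prop := out = backtrackFunction_alt boardSides dictionary usedWords currentWord usedLetters allLetters maxWords
instance (boardSides : List String) (dictionary : List String) (usedWords : List String) (currentWord : String) (usedLetters : List String) (allLetters : String) (maxWords : Int) (out : Option (List String)) : Decidable (Spec_backtrackFunction boardSides dictionary usedWords currentWord usedLetters allLetters maxWords out) := by unfold Spec_backtrackFunction; infer_instance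

-- ===== CLAIM (what is proved, stated in full; the proofs are below) =====
def Claim_equal_backtrackFunction : Prop := ∀ (boardSides : List String) (dictionary : List String) (usedWords : List String) (currentWord : String) (usedLetters : List String) (allLetters : String) (maxWords : Int), Dom_backtrackFunction boardSides dictionary usedWords currentWord usedLetters allLetters maxWords → Pre_backtrackFunction boardSides dictionary usedWords currentWord usedLetters allLetters maxWords → Spec_backtrackFunction boardSides dictionary usedWords currentWord usedLetters allLetters maxWords (backtrackFunction boardSides dictionary usedWords currentWord usedLetters allLetters maxWords)

-- ===== LEMMAS AND PROOFS =====

-- unfolding equations for the two well-founded loops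
theorem pvLoopA_nil (bs d u ul : List String) (al : String) :
    pvLoopA bs d u ul al [] = none := by
  rw [pvLoopA.eq_def]

theorem pvLoopA_cons (bs d u ul : List String) (al : String) (w : String) (ws : List String) :
    pvLoopA bs d u ul al (w :: ws) =
      (if pvCand bs u (pvLastChar u) w then
        match backtrackFunction bs d (u ++ [w]) w (pvAddLetters ul w) al 5 with
        | some r => if r.isEmpty then pvLoopA bs d u ul al ws else some r
        | none => pvLoopA bs d u ul al ws
      else pvLoopA bs d u ul al ws) := by
  rw [pvLoopA.eq_def]

theorem pvStackB_nil (bs d : List String) (al : String) :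
    pvStackB bs d al [] = none := by
  rw [pvStackB.eq_def]

theorem pvStackB_cons (bs d : List String) (al : String) (u ul : List String) (cap : Int)
    (rest : List (List String × List String × Int)) :
    pvStackB bs d al ((u, ul, cap) :: rest) =
      (if pvSetEq ul al then some u
       else if cap ≤ (u.length : Int) then pvStackB bs d al rest
       else pvStackB bs d al ((d.filterMap (fun w =>
          if pvCand bs u (pvLastChar u) w then
            some (u ++ [w], pvAddLetters ul w, (5:Int))
          else none)) ++ rest)) := by
  rw [pvStackB.eq_def]

-- the dictionary loop never returns a truthy empty list: every `some r` it returns passed `if r.isEmpty`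
theorem pvLoopA_ne_some_nil (boardSides dictionary usedWords usedLetters : List String) (allLetters : String) :
    ∀ rem, pvLoopA boardSides dictionary usedWords usedLetters allLetters rem ≠ some [] := by
  intro rem
  induction rem with
  | nil => simp [pvLoopA_nil]
  | cons w ws ih =>
    rw [pvLoopA_cons]
    split
    · cases heq : backtrackFunction boardSides dictionary (usedWords ++ [w]) w (pvAddLetters usedLetters w) allLetters 5 with
      | none => simpa using ih
      | some r =>
        by_cases hr : r.isEmpty
        · simpa [hr] using ih
        · have hr' : r ≠ [] := by simpa [List.isEmpty_iff] using hr
          simp [hr, hr']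
    · exact ih

theorem btF_ne_some_nil (boardSides dictionary usedWords : List String) (currentWord : String)
    (usedLetters : List String) (allLetters : String) (maxWords : Int) (hu : usedWords ≠ []) :
    backtrackFunction boardSides dictionary usedWords currentWord usedLetters allLetters maxWords ≠ some [] := by
  rw [backtrackFunction.eq_def]
  split
  · simp [hu]
  · split
    · simp
    · exact pvLoopA_ne_some_nil _ _ _ _ _ _

-- the stack machine processes the top frame exactly as the recursion does, then falls back on the rest
theorem pvSim (boardSides dictionary : List String) (allLetters : String) :
    ∀ (n : Nat) (u ul : List String) (cap : Int) (cw : String) (rest : List (List String × List String × Int)),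
      pvDr u cap ≤ n →
      pvStackB boardSides dictionary allLetters ((u, ul, cap) :: rest) =
        (match backtrackFunction boardSides dictionary u cw ul allLetters cap with
         | some r => some r
         | none => pvStackB boardSides dictionary allLetters rest) := by
  intro n
  induction n with
  | zero =>
    intro u ul cap cw rest hn
    have hcap : cap ≤ (u.length : Int) := by
      by_contra h
      simp [pvDr, h] at hn
    by_cases hset : pvSetEq ul allLetters
    · simp [pvStackB_cons, backtrackFunction.eq_def, hset]
    · simp [pvStackB_cons, backtrackFunction.eq_def, hset, hcap]
  | succ n ih =>
    intro u ul cap cw rest hn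
    by_cases hset : pvSetEq ul allLetters
    · simp [pvStackB_cons, backtrackFunction.eq_def, hset]
    · by_cases hcap : cap ≤ (u.length : Int)
      · simp [pvStackB_cons, backtrackFunction.eq_def, hset, hcap]
      · have hloop : ∀ (rem : List String) (rest' : List (List String × List String × Int)),
            pvStackB boardSides dictionary allLetters
              ((rem.filterMap (fun w =>
                if pvCand boardSides u (pvLastChar u) w then
                  some (u ++ [w], pvAddLetters ul w, (5:Int))
                else none)) ++ rest') =
            (match pvLoopA boardSides dictionary u ul allLetters rem with
             | some r => some r
             | none => pvStackB boardSides dictionary allLetters rest') := by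
          intro rem
          induction rem with
          | nil => intro rest'; simp [pvLoopA_nil]
          | cons w ws ihrem =>
            intro rest'
            rw [pvLoopA_cons]
            by_cases hc : pvCand boardSides u (pvLastChar u) w
            · rw [if_pos hc]
              have hchild : pvDr (u ++ [w]) 5 ≤ n := by
                have h1 : pvDr u cap = ((5:Int) - u.length).toNat + 1 := by
                  simp [pvDr, hcap]
                simp only [pvDr, List.length_append, List.length_cons, List.length_nil]
                split <;> omega
              have hstep := ih (u ++ [w]) (pvAddLetters ul w) 5 w
                ((ws.filterMap (fun w =>
                  if pvCand boardSides u (pvLastChar u) w then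
                    some (u ++ [w], pvAddLetters ul w, (5:Int))
                  else none)) ++ rest') hchild
              simp only [List.filterMap_cons, if_pos hc, List.cons_append]
              rw [hstep]
              cases heq : backtrackFunction boardSides dictionary (u ++ [w]) w (pvAddLetters ul w) allLetters 5 with
              | none => simp [ihrem rest']
              | some r =>
                have hr : r ≠ [] := by
                  intro hre
                  exact btF_ne_some_nil boardSides dictionary (u ++ [w]) w (pvAddLetters ul w) allLetters 5
                    (by simp) (hre ▸ heq)
                simp [List.isEmpty_iff, hr]
            · simp only [List.filterMap_cons, if_neg hc]
              rw [ihrem rest']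
        rw [pvStackB_cons, if_neg hset, if_neg hcap, backtrackFunction.eq_def, if_neg hset, if_neg hcap]
        exact hloop dictionary rest

-- ===== VERDICT (by name: the statement is the Claim_ definition above) =====
theorem backtrackFunction_spec : Claim_equal_backtrackFunction := by
  unfold Claim_equal_backtrackFunction Spec_backtrackFunction
  intro boardSides dictionary usedWords currentWord usedLetters allLetters maxWords _ _
  unfold backtrackFunction_alt
  rw [pvSim boardSides dictionary allLetters (pvDr usedWords maxWords) usedWords usedLetters maxWords currentWord [] (le_refl _)]
  cases backtrackFunction boardSides dictionary usedWords currentWord usedLetters allLetters maxWords <;> simp [pvStackB_nil]
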